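-- pv_equiv track=rewrite | github.com/rossetv/mediaman | src/mediaman/services/downloads/download_queue/_items.py | _stuck_seasons_from_episodes
-- ===== SOURCE A (Python) =====
-- def _stuck_seasons_from_episodes(episodes: list[dict]) -> list[dict]:
--     """Group queue episodes by season_number and count missing episodes.
--
--     Returns a sorted list of ``{"number": int, "missing_episodes": int}``
--     dicts, ascending by season number. Episodes without a season_number
--     are grouped as season 0 — Sonarr uses 0 for specials.
--     """
--     by_season: dict[int, int] = {}
--     for ep in episodes:
--         s = int(ep.get("season_number") or 0)
--         by_season[s] = by_season.get(s, 0) + 1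
--     return [
--         {"number": s, "missing_episodes": n}
--         for s, n in sorted(by_season.items())
--     ]
-- ===== SOURCE B (Python) =====
-- def _stuck_seasons_from_episodes(episodes: list[dict]) -> list[dict]:
--     """Sort-first re-implementation: sort the season keys, then emit one
--     entry per consecutive run (run length = missing episode count)."""
--     keys = sorted(int(ep.get("season_number") or 0) for ep in episodes)
--     out = []
--     i = 0
--     n = len(keys)
--     while i < n:
--         j = i + 1
--         while j < n and keys[j] == keys[i]:
--             j += 1
--         out.append({"number": keys[i], "missing_episodes": j - i})
--         i = j
--     return out
-- ===== Notes on version B (the rewrite author's own statement) =====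
-- stated objective: alternative
-- what changed: Replaces the hash-map counting pass followed by sorting the dict items with a sort-first strategy: sort the season keys once, then a single run-length scan over the sorted keys emits each season with its count, yielding the ascending order directly.
import Mathlib
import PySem

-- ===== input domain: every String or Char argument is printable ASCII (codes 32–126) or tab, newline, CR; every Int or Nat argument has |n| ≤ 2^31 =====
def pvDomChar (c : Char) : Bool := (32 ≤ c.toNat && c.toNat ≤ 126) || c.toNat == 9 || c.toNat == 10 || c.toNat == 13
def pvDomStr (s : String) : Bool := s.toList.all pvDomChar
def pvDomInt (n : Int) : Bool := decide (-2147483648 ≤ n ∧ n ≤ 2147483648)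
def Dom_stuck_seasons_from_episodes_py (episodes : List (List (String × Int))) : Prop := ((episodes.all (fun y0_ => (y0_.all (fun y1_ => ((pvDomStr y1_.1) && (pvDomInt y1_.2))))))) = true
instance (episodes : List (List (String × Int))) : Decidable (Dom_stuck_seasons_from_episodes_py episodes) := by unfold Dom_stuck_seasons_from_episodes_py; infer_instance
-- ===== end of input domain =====

-- B replaces A's hash-map counting pass + sort of the dict items by a
-- sort-the-keys-first strategy followed by a single run-length scan
-- (alternative decomposition, same asymptotic cost).


-- shared helper: the season key `int(ep.get("season_number") or 0)` (both
-- Pythons contain this exact expression; `int` on an int is the identity,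
-- `or 0` maps a missing key — and the falsy value 0 itself — to 0)
def pvSeasonKey (ep : List (String × Int)) : Int :=
  match (PySem.Dict.mk ep).get? "season_number" with
  | none => 0
  | some v => if v = 0 then 0 else v

-- ===== PORT A =====
-- dict counting pass, then sorted(by_season.items()); the dict keys are
-- distinct, so Python's tuple comparison on the items is exactly comparison
-- of the first components (the sort key used here).
def stuck_seasons_from_episodes_py (episodes : List (List (String × Int))) : List (List (String × Int)) :=
  let bySeason : PySem.Dict Int Int := episodes.foldl
    (fun d ep =>
      let s := pvSeasonKey ep
      d.insert s (d.getD s 0 + 1)) PySem.Dict.empty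
  (PySem.List.sorted bySeason.items (fun p => p.1) false).map
    (fun p => [("number", p.1), ("missing_episodes", p.2)])

-- ===== PORT B =====
-- run-length scan over the sorted keys: the outer while loop of Source B is this
-- recursion, the inner `while keys[j] == keys[i]` scan is the takeWhile.
def pvRuns : List Int → List (Int × Int)
  | [] => []
  | k :: rest =>
    let run := rest.takeWhile (fun x => x == k)
    (k, 1 + (run.length : Int)) :: pvRuns (rest.drop run.length)
termination_by l => l.length
decreasing_by simp

def stuck_seasons_from_episodes_py_alt (episodes : List (List (String × Int))) : List (List (String × Int)) :=
  let keys := PySem.List.sorted (episodes.map pvSeasonKey) (fun x => x) false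
  (pvRuns keys).map (fun p => [("number", p.1), ("missing_episodes", p.2)])

-- ===== PRECONDITION & SPEC =====
def Spec_stuck_seasons_from_episodes_py (episodes : List (List (String × Int))) (out : List (List (String × Int))) : Prop := out = stuck_seasons_from_episodes_py_alt episodes
instance (episodes : List (List (String × Int))) (out : List (List (String × Int))) : Decidable (Spec_stuck_seasons_from_episodes_py episodes out) := by unfold Spec_stuck_seasons_from_episodes_py; infer_instance

-- ===== CLAIM (what is proved, stated in full; the proofs are below) =====
def Claim_equal_stuck_seasons_from_episodes_py : Prop := ∀ (episodes : List (List (String × Int))), Dom_stuck_seasons_from_episodes_py episodes → Spec_stuck_seasons_from_episodes_py episodes (stuck_seasons_from_episodes_py episodes)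

-- ===== LEMMAS AND PROOFS =====

theorem pv_drop_takeWhile (p : Int → Bool) (l : List Int) :
    l.drop (l.takeWhile p).length = l.dropWhile p := by
  calc l.drop (l.takeWhile p).length
      = ((l.takeWhile p) ++ l.dropWhile p).drop (l.takeWhile p).length := by
        rw [List.takeWhile_append_dropWhile]
    _ = l.dropWhile p := List.drop_left

theorem pvRuns_cons (k : Int) (rest : List Int) :
    pvRuns (k :: rest) =
      (k, 1 + ((rest.takeWhile (fun x => x == k)).length : Int)) ::
        pvRuns (rest.dropWhile (fun x => x == k)) := by
  rw [pvRuns, pv_drop_takeWhile]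

theorem pvRuns_fst_mem (l : List Int) : ∀ p ∈ pvRuns l, p.1 ∈ l := by
  induction l using pvRuns.induct with
  | case1 => simp [pvRuns]
  | case2 k rest run ih =>
    rw [pvRuns_cons]
    intro p hp
    rcases List.mem_cons.mp hp with h | h
    · subst h; exact List.mem_cons_self
    · have : p.1 ∈ rest.dropWhile (fun x => x == k) := by
        have := ih p (by rwa [show run.length = (rest.takeWhile (fun x => x == k)).length from rfl, pv_drop_takeWhile] )
        rwa [show run = rest.takeWhile (fun x => x == k) from rfl, pv_drop_takeWhile] at this
      exact List.mem_cons_of_mem _ ((rest.dropWhile_sublist _).subset this)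

theorem pv_dropWhile_head_false (p : Int → Bool) : ∀ (l : List Int) (h : Int) (tl : List Int),
    l.dropWhile p = h :: tl → p h = false := by
  intro l
  induction l with
  | nil => intro h tl hd; simp at hd
  | cons a l ih =>
    intro h tl hd
    by_cases hp : p a
    · rw [List.dropWhile_cons_of_pos hp] at hd; exact ih _ _ hd
    · rw [List.dropWhile_cons_of_neg hp] at hd
      cases hd
      simpa using hp

theorem pv_lt_of_mem_dropWhile (k : Int) (rest : List Int)
    (hk : ∀ x ∈ rest, k ≤ x) (hp : rest.Pairwise (· ≤ ·)) :
    ∀ x ∈ rest.dropWhile (fun x => x == k), k < x := by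
  cases hd : rest.dropWhile (fun x => x == k) with
  | nil => simp
  | cons h tl =>
    have hmemrest : ∀ x ∈ h :: tl, x ∈ rest := by
      intro x hx
      exact (rest.dropWhile_sublist _).subset (hd ▸ hx)
    have hhk : h ≠ k := by
      have := pv_dropWhile_head_false (fun x => x == k) rest h tl hd
      simpa using this
    have hkh : k < h := lt_of_le_of_ne (hk h (hmemrest h List.mem_cons_self)) (Ne.symm hhk)
    have hptl : (h :: tl).Pairwise (· ≤ ·) := hd ▸ hp.sublist (rest.dropWhile_sublist _)
    intro x hx
    rcases List.mem_cons.mp hx with rfl | hx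
    · exact hkh
    · exact lt_of_lt_of_le hkh ((List.pairwise_cons.mp hptl).1 x hx)


theorem pvRuns_pairwise (l : List Int) (hl : l.Pairwise (· ≤ ·)) :
    (pvRuns l).Pairwise (fun a b => a.1 < b.1) := by
  induction l using pvRuns.induct with
  | case1 => simp [pvRuns]
  | case2 k rest run ih =>
    rcases List.pairwise_cons.mp hl with ⟨hk, hrest⟩
    have hd : rest.drop run.length = rest.dropWhile (fun x => x == k) :=
      pv_drop_takeWhile _ _
    rw [pvRuns_cons, List.pairwise_cons]
    refine ⟨?_, ?_⟩
    · intro p hp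
      exact pv_lt_of_mem_dropWhile k rest hk hrest p.1 (pvRuns_fst_mem _ p hp)
    · rw [← hd]
      exact ih (by rw [hd]; exact hrest.sublist (rest.dropWhile_sublist _))

theorem pvRuns_perm (l : List Int) (hl : l.Pairwise (· ≤ ·)) :
    (pvRuns l).Perm ((PySem.Set.ofList l).map (fun k => (k, (l.count k : Int)))) := by
  induction l using pvRuns.induct with
  | case1 => simp [pvRuns]
  | case2 k rest run ih =>
    rcases List.pairwise_cons.mp hl with ⟨hk, hrest⟩
    have hd : rest.drop run.length = rest.dropWhile (fun x => x == k) :=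
      pv_drop_takeWhile _ _
    have hruneq : run = rest.takeWhile (fun x => x == k) := rfl
    have hsplit : (rest.takeWhile (fun x => x == k)) ++ rest.dropWhile (fun x => x == k) = rest :=
      List.takeWhile_append_dropWhile
    have hdlt : ∀ x ∈ rest.dropWhile (fun x => x == k), k < x :=
      pv_lt_of_mem_dropWhile k rest hk hrest
    have hkd : k ∉ rest.dropWhile (fun x => x == k) := fun hx => lt_irrefl k (hdlt k hx)
    have htk : ∀ x ∈ rest.takeWhile (fun x => x == k), x = k := by
      intro x hx
      simpa using List.mem_takeWhile_imp hx
    have hdp : (rest.dropWhile (fun x => x == k)).Pairwise (· ≤ ·) :=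
      hrest.sublist (rest.dropWhile_sublist _)
    have hrepl : rest.takeWhile (fun x => x == k)
        = List.replicate (rest.takeWhile (fun x => x == k)).length k :=
      List.eq_replicate_of_mem htk
    -- count facts
    have hcount_k : (k :: rest).count k
        = (rest.takeWhile (fun x => x == k)).length + 1 := by
      rw [List.count_cons_self, ← hsplit, List.count_append]
      rw [List.count_eq_zero_of_not_mem hkd]
      conv_lhs => rw [hrepl]
      simp
    have hcount_d : ∀ x ∈ PySem.Set.ofList (rest.dropWhile (fun x => x == k)),
        (k :: rest).count x = (rest.dropWhile (fun x => x == k)).count x := by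
      intro x hx
      have hxd : x ∈ rest.dropWhile (fun x => x == k) := (PySem.Set.mem_ofList _ _).mp hx
      have hxk : k ≠ x := ne_of_lt (hdlt x hxd)
      rw [List.count_cons_of_ne hxk]
      conv_lhs => rw [← hsplit]
      rw [List.count_append]
      have h0 : (rest.takeWhile (fun x => x == k)).count x = 0 := by
        apply List.count_eq_zero_of_not_mem
        intro hmem
        exact hxk.symm (htk x hmem)
      omega
    -- ofList decomposition (as a permutation)
    have hnodup2 : (k :: PySem.Set.ofList (rest.dropWhile (fun x => x == k))).Nodup := by
      refine List.nodup_cons.mpr ⟨?_, PySem.Set.nodup_ofList _⟩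
      intro hmem
      exact hkd ((PySem.Set.mem_ofList _ _).mp hmem)
    have hofl : (PySem.Set.ofList (k :: rest)).Perm
        (k :: PySem.Set.ofList (rest.dropWhile (fun x => x == k))) := by
      refine (List.perm_ext_iff_of_nodup (PySem.Set.nodup_ofList _) hnodup2).mpr ?_
      intro a
      simp only [PySem.Set.mem_ofList, List.mem_cons]
      constructor
      · rintro (rfl | ha)
        · exact Or.inl rfl
        · rw [← hsplit] at ha
          rcases List.mem_append.mp ha with h | h
          · exact Or.inl (htk a h)
          · exact Or.inr h
      · rintro (rfl | ha)
        · exact Or.inl rfl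
        · exact Or.inr (by
            rw [← hsplit]
            exact List.mem_append_right _ ha)
    -- assemble
    rw [pvRuns_cons]
    have ihd := ih (by rw [hd]; exact hdp)
    rw [hd] at ihd
    have hmapeq : (k, 1 + ((rest.takeWhile (fun x => x == k)).length : Int)) ::
        (PySem.Set.ofList (rest.dropWhile (fun x => x == k))).map
          (fun x => (x, ((rest.dropWhile (fun x => x == k)).count x : Int)))
        = (k :: PySem.Set.ofList (rest.dropWhile (fun x => x == k))).map
          (fun x => (x, ((k :: rest).count x : Int))) := by
      rw [List.map_cons]
      congr 1
      · rw [hcount_k]; push_cast; ring_nf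
      · exact (List.map_congr_left (fun x hx => by rw [hcount_d x hx])).symm
    refine List.Perm.trans (List.Perm.cons _ ihd) ?_
    rw [hmapeq]
    exact (hofl.map _).symm

-- the heart of the equivalence: sorting the counter's items by key is
-- exactly the run-length scan of the sorted key list
theorem pv_sorted_counter_items_eq_pvRuns (ks : List Int) :
    PySem.List.sorted (PySem.Dict.counter ks).items (fun p => p.1) false
      = pvRuns (PySem.List.sorted ks (fun x => x) false) := by
  have hSperm : (PySem.List.sorted ks (fun x => x) false).Perm ks :=
    PySem.List.sorted_perm ks (fun x => x) false
  have hSpair : (PySem.List.sorted ks (fun x => x) false).Pairwise (· ≤ ·) :=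
    PySem.List.sorted_pairwise ks (fun x => x)
  apply PySem.List.sorted_eq_of_perm_of_pairwise_lt
  · rw [PySem.Dict.items_counter]
    refine (pvRuns_perm _ hSpair).trans ?_
    have hmc : (PySem.Set.ofList (PySem.List.sorted ks (fun x => x) false)).map
          (fun k => (k, ((PySem.List.sorted ks (fun x => x) false).count k : Int)))
        = (PySem.Set.ofList (PySem.List.sorted ks (fun x => x) false)).map
          (fun k => (k, (ks.count k : Int))) := by
      apply List.map_congr_left
      intro x _
      rw [hSperm.count_eq]
    rw [hmc]
    apply List.Perm.map
    refine (List.perm_ext_iff_of_nodup (PySem.Set.nodup_ofList _)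
      (PySem.Set.nodup_ofList _)).mpr ?_
    intro a
    rw [PySem.Set.mem_ofList, PySem.Set.mem_ofList]
    exact hSperm.mem_iff
  · exact pvRuns_pairwise _ hSpair

-- ===== VERDICT (by name: the statement is the Claim_ definition above) =====
theorem stuck_seasons_from_episodes_py_spec : Claim_equal_stuck_seasons_from_episodes_py := by
  intro episodes _
  unfold Spec_stuck_seasons_from_episodes_py
  unfold stuck_seasons_from_episodes_py stuck_seasons_from_episodes_py_alt
  have hfold : episodes.foldl
      (fun d ep =>
        let s := pvSeasonKey ep
        d.insert s (d.getD s 0 + 1)) PySem.Dict.empty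
      = PySem.Dict.counter (episodes.map pvSeasonKey) := by
    rw [← PySem.Dict.foldl_insert_getD_add_one_eq_counter, List.foldl_map]
  rw [hfold]
  exact congrArg (List.map (fun p => [("number", p.1), ("missing_episodes", p.2)]))
    (pv_sorted_counter_items_eq_pvRuns (episodes.map pvSeasonKey))
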